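-- pv_equiv track=rewrite | github.com/mariamtvalchrelidze/Algorithms-1 | 2-week/exercises/3.py | convert_ten_to_three
-- ===== SOURCE A (Python) =====
-- def convert_ten_to_three(N, s=''):
--     if N == 0:
--         return s
--     else:
--         d = N%3
--         s = str(d) + s
--         N=N//3
--         return convert_ten_to_three(N,s)
-- ===== SOURCE B (Python) =====
-- def convert_ten_to_three(N, s=''):
--     if N == 0:
--         return s
--     p = 1
--     while p * 3 <= N:
--         p *= 3
--     out = []
--     while p > 0:
--         out.append(str(N // p))
--         N %= p
--         p //= 3
--     return ''.join(out) + s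
-- ===== Notes on version B (the rewrite author's own statement) =====
-- stated objective: alternative
-- what changed: Replaces the LSB-first string-prepending tail recursion with an MSB-first iterative algorithm: first find the largest power of 3 not exceeding N, then emit digits most-significant-first by repeated division and remainder, joining the digit list once at the end.
import Mathlib
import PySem

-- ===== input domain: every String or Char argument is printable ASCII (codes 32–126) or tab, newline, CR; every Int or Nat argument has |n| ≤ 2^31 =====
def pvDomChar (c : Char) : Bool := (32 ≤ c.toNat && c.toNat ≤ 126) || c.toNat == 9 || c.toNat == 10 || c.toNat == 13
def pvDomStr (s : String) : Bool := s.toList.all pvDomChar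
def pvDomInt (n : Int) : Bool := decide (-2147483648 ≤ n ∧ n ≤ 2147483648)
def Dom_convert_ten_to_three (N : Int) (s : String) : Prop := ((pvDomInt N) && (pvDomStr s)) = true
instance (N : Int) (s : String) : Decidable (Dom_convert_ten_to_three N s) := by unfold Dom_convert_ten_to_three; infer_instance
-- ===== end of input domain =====

-- B replaces A's LSB-first string-prepending tail recursion by an MSB-first algorithm:
-- find the largest power of 3 ≤ N, then emit digits most-significant-first by repeated
-- division, joining once at the end (objective: alternative; same value for 0 ≤ N).

-- ===== PORT A =====
-- fuel-based transcription of A's recursion (Python A recurses forever for N < 0, excluded by Pre_)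
def pvRecA : Nat → Int → String → String
  | 0, _, s => s
  | f+1, N, s =>
    if N = 0 then s
    else pvRecA f (PySem.Int.floordiv N 3) (PySem.Int.toStr (PySem.Int.mod N 3) ++ s)

def convert_ten_to_three (N : Int) (s : String) : String := pvRecA (N.toNat + 1) N s

-- ===== PORT B =====
-- first while loop of B: while p * 3 <= N: p *= 3
def pvFindPow : Nat → Int → Int → Int
  | 0, _, p => p
  | f+1, N, p => if p * 3 ≤ N then pvFindPow f N (p * 3) else p

-- second while loop of B: while p > 0: out.append(str(N // p)); N %= p; p //= 3
def pvEmit : Nat → Int → Int → List String → List String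
  | 0, _, _, out => out
  | f+1, N, p, out =>
    if 0 < p then
      pvEmit f (PySem.Int.mod N p) (PySem.Int.floordiv p 3)
        (out ++ [PySem.Int.toStr (PySem.Int.floordiv N p)])
    else out

def convert_ten_to_three_alt (N : Int) (s : String) : String :=
  if N = 0 then s
  else
    PySem.Str.join "" (pvEmit (N.toNat + 1) N (pvFindPow (N.toNat + 1) N 1) []) ++ s

-- ===== PRECONDITION & SPEC =====
-- Python A never returns for N < 0 (infinite recursion → RecursionError), so Pre_ excludes N < 0
def Pre_convert_ten_to_three (N : Int) (s : String) : Prop := 0 ≤ N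
instance (N : Int) (s : String) : Decidable (Pre_convert_ten_to_three N s) := by unfold Pre_convert_ten_to_three; infer_instance
def pvWitness_convert_ten_to_three : Int × String := (5, "")
def Spec_convert_ten_to_three (N : Int) (s : String) (out : String) : Prop := out = convert_ten_to_three_alt N s
instance (N : Int) (s : String) (out : String) : Decidable (Spec_convert_ten_to_three N s out) := by unfold Spec_convert_ten_to_three; infer_instance

-- ===== CLAIM (what is proved, stated in full; the proofs are below) =====
def Claim_equal_convert_ten_to_three : Prop := ∀ (N : Int) (s : String), Dom_convert_ten_to_three N s → Pre_convert_ten_to_three N s → Spec_convert_ten_to_three N s (convert_ten_to_three N s)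

-- ===== LEMMAS AND PROOFS =====

-- canonical base-3 string of a natural number (LSB-first recursion, "" for 0)
def rep3 (n : Nat) : String :=
  if n = 0 then "" else rep3 (n / 3) ++ PySem.Int.toStr ((n % 3 : Nat) : Int)
decreasing_by exact Nat.div_lt_self (Nat.pos_of_ne_zero (by assumption)) (by norm_num)

-- the (k+1)-digit zero-padded base-3 string of n (MSB-first recursion)
def padRep : Nat → Nat → String
  | 0, _ => ""
  | k+1, n => PySem.Int.toStr ((n / 3 ^ k : Nat) : Int) ++ padRep k (n % 3 ^ k)

theorem inter_nil (l : List (List Char)) : List.intercalate [] l = l.flatten := by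
  induction l with
  | nil => simp [List.intercalate]
  | cons a t ih =>
    cases t with
    | nil => simp [List.intercalate]
    | cons b t' =>
      simp [List.intercalate, List.intersperse] at ih ⊢
      simpa using ih

theorem join_cons (a : String) (parts : List String) :
    PySem.Str.join "" (a :: parts) = a ++ PySem.Str.join "" parts := by
  apply String.toList_inj.mp
  simp [PySem.Str.toList_join, PySem.Chars.join, inter_nil]

theorem join_nil' : PySem.Str.join "" ([] : List String) = "" := rfl

theorem join_snoc (out : List String) (x : String) :
    PySem.Str.join "" (out ++ [x]) = PySem.Str.join "" out ++ x := by
  induction out with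
  | nil => simp [join_cons, join_nil', String.empty_append, String.append_empty]
  | cons a t ih => rw [List.cons_append, join_cons, join_cons, ih, String.append_assoc]

-- cast helpers
theorem fdiv_cast (m k : Nat) : PySem.Int.floordiv (m : Int) (k : Int) = ((m / k : Nat) : Int) :=
  PySem.Int.floordiv_natCast m k

theorem mod_cast' (m k : Nat) : PySem.Int.mod (m : Int) (k : Int) = ((m % k : Nat) : Int) :=
  PySem.Int.mod_natCast m k

-- unfolding of rep3 at a nonzero argument
theorem rep3_pos (n : Nat) (h : n ≠ 0) :
    rep3 n = rep3 (n / 3) ++ PySem.Int.toStr ((n % 3 : Nat) : Int) := by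
  conv_lhs => rw [rep3]
  rw [if_neg h]

-- A's recursion computes rep3
theorem recA_eq : ∀ (f n : Nat) (s : String), n < f → pvRecA f (n : Int) s = rep3 n ++ s := by
  intro f
  induction f with
  | zero => intro n s h; omega
  | succ f ih =>
    intro n s h
    by_cases h0 : n = 0
    · subst h0
      simp [pvRecA, rep3]
    · have hne : (n : Int) ≠ 0 := by exact_mod_cast h0
      rw [pvRecA, if_neg hne]
      have e1 : PySem.Int.floordiv (n : Int) 3 = ((n / 3 : Nat) : Int) := by
        have := fdiv_cast n 3; push_cast at this ⊢; exact this
      have e2 : PySem.Int.mod (n : Int) 3 = ((n % 3 : Nat) : Int) := by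
        have := mod_cast' n 3; push_cast at this ⊢; exact this
      rw [e1, e2, ih (n / 3) _ (by omega), rep3_pos n h0, String.append_assoc]

-- findPow finds the maximal power of 3 below n
theorem findPow_spec : ∀ (f p n : Nat), 1 ≤ p → p ≤ n → n < p * 3 ^ f →
    ∃ k, pvFindPow f (n : Int) (p : Int) = ((p * 3 ^ k : Nat) : Int) ∧
      p * 3 ^ k ≤ n ∧ n < p * 3 ^ (k + 1) := by
  intro f
  induction f with
  | zero => intro p n h1 h2 h3; simp at h3; omega
  | succ f ih =>
    intro p n h1 h2 h3
    rw [pvFindPow]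
    by_cases hc : (p : Int) * 3 ≤ (n : Int)
    · have hc' : p * 3 ≤ n := by exact_mod_cast hc
      have e : (p : Int) * 3 = ((p * 3 : Nat) : Int) := by push_cast; ring
      rw [if_pos hc, e]
      obtain ⟨k, hk1, hk2, hk3⟩ := ih (p * 3) n (by omega) hc'
        (by calc n < p * 3 ^ (f + 1) := h3
                 _ = p * 3 * 3 ^ f := by ring)
      refine ⟨k + 1, ?_, ?_, ?_⟩
      · rw [hk1]; congr 1; ring
      · calc p * 3 ^ (k + 1) = p * 3 * 3 ^ k := by ring
             _ ≤ n := hk2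
      · calc n < p * 3 * 3 ^ (k + 1) := hk3
             _ = p * 3 ^ (k + 1 + 1) := by ring
    · have hc' : ¬ p * 3 ≤ n := by exact_mod_cast hc
      exact ⟨0, by rw [if_neg hc]; simp, by simpa using h2, by simp [pow_one]; omega⟩

-- the emit loop produces exactly the padded digit strings
theorem emit_spec : ∀ (k f n : Nat) (out : List String), k < f →
    PySem.Str.join "" (pvEmit f (n : Int) ((3 ^ k : Nat) : Int) out) =
      PySem.Str.join "" out ++ padRep (k + 1) n := by
  intro k
  induction k with
  | zero =>
    intro f n out hf
    match f, hf with
    | f + 1, _ =>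
      rw [pvEmit, if_pos (by norm_num)]
      have e1 : PySem.Int.mod (n : Int) ((3 ^ 0 : Nat) : Int) = ((0 : Nat) : Int) := by
        rw [mod_cast']; norm_num
      have e2 : PySem.Int.floordiv ((3 ^ 0 : Nat) : Int) 3 = ((0 : Nat) : Int) := by
        have := fdiv_cast (3 ^ 0) 3; push_cast at this ⊢; simpa using this
      have e3 : PySem.Int.floordiv (n : Int) ((3 ^ 0 : Nat) : Int) = ((n : Nat) : Int) := by
        rw [fdiv_cast]; norm_num
      rw [e1, e2, e3]
      have stop : ∀ g out', pvEmit g ((0:Nat) : Int) ((0:Nat) : Int) out' = out' := by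
        intro g out'; cases g <;> simp [pvEmit]
      rw [stop, join_snoc]
      have hp : padRep 1 n = PySem.Int.toStr ((n : Nat) : Int) := by
        show PySem.Int.toStr ((n / 3 ^ 0 : Nat) : Int) ++ padRep 0 (n % 3 ^ 0) = _
        rw [pow_zero, Nat.div_one]
        show _ ++ "" = _
        rw [String.append_empty]
      rw [hp]
  | succ k ih =>
    intro f n out hf
    match f, hf with
    | f + 1, hf =>
      rw [pvEmit, if_pos (by positivity)]
      have e1 : PySem.Int.mod (n : Int) ((3 ^ (k+1) : Nat) : Int) = ((n % 3 ^ (k+1) : Nat) : Int) :=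
        mod_cast' n (3 ^ (k+1))
      have e2 : PySem.Int.floordiv ((3 ^ (k+1) : Nat) : Int) 3 = ((3 ^ k : Nat) : Int) := by
        have h := fdiv_cast (3 ^ (k+1)) 3
        have h3 : ((3 : Nat) : Int) = 3 := by norm_num
        rw [h3] at h
        rw [h]; congr 1; rw [pow_succ, Nat.mul_div_cancel _ (by norm_num : 0 < 3)]
      have e3 : PySem.Int.floordiv (n : Int) ((3 ^ (k+1) : Nat) : Int) = ((n / 3 ^ (k+1) : Nat) : Int) :=
        fdiv_cast n (3 ^ (k+1))
      rw [e1, e2, e3, ih f (n % 3 ^ (k+1)) _ (by omega), join_snoc]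
      have hp : padRep (k + 1 + 1) n =
          PySem.Int.toStr ((n / 3 ^ (k+1) : Nat) : Int) ++ padRep (k + 1) (n % 3 ^ (k+1)) := rfl
      rw [hp, String.append_assoc]

-- padRep also satisfies the LSB-first recursion
theorem padRep_lsb : ∀ (k n : Nat), n < 3 ^ (k + 1) →
    padRep (k + 1) n = padRep k (n / 3) ++ PySem.Int.toStr ((n % 3 : Nat) : Int) := by
  intro k
  induction k with
  | zero =>
    intro n h
    have h3 : n < 3 := by simpa using h
    show PySem.Int.toStr ((n / 3 ^ 0 : Nat) : Int) ++ padRep 0 (n % 3 ^ 0) = _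
    have e : n / 3 ^ 0 = n % 3 := by
      rw [pow_zero, Nat.div_one, Nat.mod_eq_of_lt h3]
    rw [e]
    show _ ++ "" = "" ++ _
    rw [String.append_empty, String.empty_append]
  | succ k ih =>
    intro n h
    show PySem.Int.toStr ((n / 3 ^ (k+1) : Nat) : Int) ++ padRep (k+1) (n % 3 ^ (k+1)) = _
    have hlt : n % 3 ^ (k+1) < 3 ^ (k+1) := Nat.mod_lt n (by positivity)
    rw [ih (n % 3 ^ (k+1)) hlt]
    have d1 : n % 3 ^ (k+1) / 3 = n / 3 % 3 ^ k := by
      rw [pow_succ']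
      exact Nat.mod_mul_right_div_self n 3 (3 ^ k)
    have d2 : n % 3 ^ (k+1) % 3 = n % 3 :=
      Nat.mod_mod_of_dvd n (dvd_pow_self 3 (Nat.succ_ne_zero k))
    have d3 : n / 3 / 3 ^ k = n / 3 ^ (k+1) := by
      rw [Nat.div_div_eq_div_mul, ← pow_succ']
    rw [d1, d2]
    show _ = PySem.Int.toStr ((n / 3 / 3 ^ k : Nat) : Int) ++ padRep k (n / 3 % 3 ^ k) ++ _
    rw [d3, String.append_assoc]

-- for n in [3^k, 3^(k+1)) the padded representation is the canonical one
theorem rep3_eq_padRep : ∀ (k n : Nat), 3 ^ k ≤ n → n < 3 ^ (k + 1) → rep3 n = padRep (k + 1) n := by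
  intro k
  induction k with
  | zero =>
    intro n h1 h2
    simp only [pow_zero] at h1
    have h3 : n < 3 := by simpa using h2
    rw [rep3_pos n (by omega)]
    have e0 : n / 3 = 0 := by omega
    rw [e0]
    have ez : rep3 0 = "" := by rw [rep3]; simp
    rw [ez, String.empty_append]
    show _ = PySem.Int.toStr ((n / 3 ^ 0 : Nat) : Int) ++ padRep 0 (n % 3 ^ 0)
    rw [pow_zero, Nat.div_one]
    show _ = _ ++ ""
    rw [String.append_empty, Nat.mod_eq_of_lt h3]
  | succ k ih =>
    intro n h1 h2
    have hp : 0 < 3 ^ (k + 1) := by positivity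
    rw [rep3_pos n (by omega)]
    have hd1 : 3 ^ k ≤ n / 3 := (Nat.le_div_iff_mul_le (by norm_num)).mpr
      (by calc 3 ^ k * 3 = 3 ^ (k + 1) := by ring
            _ ≤ n := h1)
    have hd2 : n / 3 < 3 ^ (k + 1) := (Nat.div_lt_iff_lt_mul (by norm_num)).mpr
      (by calc n < 3 ^ (k + 1 + 1) := h2
            _ = 3 ^ (k + 1) * 3 := by ring)
    rw [ih (n / 3) hd1 hd2]
    exact (padRep_lsb (k + 1) n h2).symm

theorem nat_lt_pow (n : Nat) : n < 3 ^ (n + 1) :=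
  lt_of_lt_of_le (Nat.lt_pow_self (by norm_num)) (Nat.pow_le_pow_right (by norm_num) (by omega))

-- B computes rep3 for positive n
theorem altB_eq (n : Nat) (s : String) (h : 1 ≤ n) :
    convert_ten_to_three_alt (n : Int) s = rep3 n ++ s := by
  have hne : (n : Int) ≠ 0 := by exact_mod_cast (by omega : n ≠ 0)
  unfold convert_ten_to_three_alt
  rw [if_neg hne]
  have htn : ((n : Int)).toNat = n := Int.toNat_natCast n
  rw [htn]
  obtain ⟨k, hk1, hk2, hk3⟩ := findPow_spec (n + 1) 1 n le_rfl h
    (by simpa using nat_lt_pow n)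
  rw [one_mul] at hk2 hk3
  have h1c : (1 : Int) = ((1 : Nat) : Int) := by norm_num
  rw [h1c, hk1, one_mul]
  have hkn : k < n + 1 := by
    have := Nat.lt_pow_self (show 1 < 3 by norm_num) (n := k)
    omega
  rw [emit_spec k (n + 1) n [] hkn, join_nil', String.empty_append]
  rw [rep3_eq_padRep k n hk2 hk3]

-- ===== VERDICT (by name: the statement is the Claim_ definition above) =====
theorem convert_ten_to_three_spec : Claim_equal_convert_ten_to_three := by
  intro N s _ pre
  unfold Spec_convert_ten_to_three
  lift N to Nat using pre with n
  by_cases h0 : n = 0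
  · subst h0
    simp [convert_ten_to_three, convert_ten_to_three_alt, pvRecA]
  · unfold convert_ten_to_three
    rw [show ((n : Int)).toNat = n from Int.toNat_natCast n]
    rw [recA_eq (n + 1) n s (by omega), altB_eq n s (by omega)]
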